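-- pv_equiv track=rewrite | github.com/cesar024/Gil-SalamancaActivid | app.py | validar_letras
-- ===== SOURCE A (Python) =====
-- def validar_letras(entrada):
--     letras = entrada.split(',')
--     letras = [letra.strip() for letra in letras]
--
--     if len(letras) == 0:
--         return False, "Error: No se ingresaron letras."
--
--     for letra in letras:
--         if not letra.isalpha():
--             return False, f"Error: '{letra}' no es una letra válida."
--
--     if len(letras) != len(set(letras)):
--         return False, "Error: Las letras no deben estar repetidas."
--
--     return True, "Entrada válida."
-- ===== SOURCE B (Python) =====
-- def validar_letras(entrada):
--     bad = None
--     has_dup = False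
--     seen = set()
--     for tok in entrada.split(','):
--         tok = tok.strip()
--         if bad is None and not tok.isalpha():
--             bad = tok
--         if tok in seen:
--             has_dup = True
--         else:
--             seen.add(tok)
--     if bad is not None:
--         return False, f"Error: '{bad}' no es una letra válida."
--     if has_dup:
--         return False, "Error: Las letras no deben estar repetidas."
--     return True, "Entrada válida."
-- ===== Notes on version B (the rewrite author's own statement) =====
-- stated objective: alternative
-- what changed: A does three separate passes (a list comprehension to strip, an early-return scan for a non-alpha token, and a set() rebuild to test duplicates); B is a single loop over the raw tokens maintaining the first bad token, a seen-set and a duplicate flag, deciding the result after the scan.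
import Mathlib
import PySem

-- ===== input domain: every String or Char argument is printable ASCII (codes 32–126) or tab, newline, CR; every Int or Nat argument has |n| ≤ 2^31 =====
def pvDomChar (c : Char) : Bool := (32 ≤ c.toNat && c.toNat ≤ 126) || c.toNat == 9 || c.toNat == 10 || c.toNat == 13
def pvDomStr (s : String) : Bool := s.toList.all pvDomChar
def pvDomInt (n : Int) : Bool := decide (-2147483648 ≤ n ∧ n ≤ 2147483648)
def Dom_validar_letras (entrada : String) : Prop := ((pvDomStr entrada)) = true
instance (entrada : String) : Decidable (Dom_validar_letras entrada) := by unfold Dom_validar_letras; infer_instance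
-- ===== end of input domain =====

-- B replaces A's three passes (strip comprehension, early-return alpha scan, set() length check)
-- by ONE loop maintaining the first bad token, a seen-set and a duplicate flag (objective: alternative).

-- ===== PORT A =====
-- for-loop with early return: first token that is not alphabetic
def pvScanA : List (List Char) → Option (List Char)
  | [] => none
  | letra :: rest =>
    if !(PySem.Chars.strIsalpha letra) then some letra else pvScanA rest

def validar_letras (entrada : String) : Bool × String :=
  let letras := (PySem.Chars.splitOn entrada.toList [',']).map PySem.Chars.strip
  if letras.length == 0 then (false, "Error: No se ingresaron letras.")
  else
    match pvScanA letras with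
    | some letra =>
      (false, String.ofList ("Error: '".toList ++ letra ++ "' no es una letra válida.".toList))
    | none =>
      if letras.length != (PySem.Set.ofList letras).length then
        (false, "Error: Las letras no deben estar repetidas.")
      else (true, "Entrada válida.")

-- ===== PORT B =====
-- one loop body; state = (first bad token or none, seen set, duplicate flag)
def pvStepCore (st : Option (List Char) × PySem.Set (List Char) × Bool) (tok : List Char) :
    Option (List Char) × PySem.Set (List Char) × Bool :=
  let bad := if st.1.isNone && !(PySem.Chars.strIsalpha tok) then some tok else st.1
  if PySem.Set.contains st.2.1 tok then (bad, st.2.1, true)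
  else (bad, PySem.Set.add st.2.1 tok, st.2.2)

def pvStepB (st : Option (List Char) × PySem.Set (List Char) × Bool) (tokRaw : List Char) :
    Option (List Char) × PySem.Set (List Char) × Bool :=
  pvStepCore st (PySem.Chars.strip tokRaw)

def validar_letras_alt (entrada : String) : Bool × String :=
  let st := (PySem.Chars.splitOn entrada.toList [',']).foldl pvStepB
    (none, PySem.Set.empty, false)
  match st.1 with
  | some bad =>
    (false, String.ofList ("Error: '".toList ++ bad ++ "' no es una letra válida.".toList))
  | none =>
    if st.2.2 then (false, "Error: Las letras no deben estar repetidas.")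
    else (true, "Entrada válida.")

-- ===== PRECONDITION & SPEC =====
def Spec_validar_letras (entrada : String) (out : Bool × String) : Prop := out = validar_letras_alt entrada
instance (entrada : String) (out : Bool × String) : Decidable (Spec_validar_letras entrada out) := by unfold Spec_validar_letras; infer_instance

-- ===== CLAIM (what is proved, stated in full; the proofs are below) =====
def Claim_equal_validar_letras : Prop := ∀ (entrada : String), Dom_validar_letras entrada → Spec_validar_letras entrada (validar_letras entrada)

-- ===== LEMMAS AND PROOFS =====

-- B's duplicate flag, factored as a predicate: no token of the list is already seen
def pvFresh : PySem.Set (List Char) → List (List Char) → Bool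
  | _, [] => true
  | s, x :: xs => !(PySem.Set.contains s x) && pvFresh (PySem.Set.add s x) xs

theorem pvFoldInv (ls : List (List Char)) (bo : Option (List Char))
    (s : PySem.Set (List Char)) (b : Bool) :
    ls.foldl pvStepCore (bo, s, b) =
      (bo.or (pvScanA ls), List.foldl PySem.Set.add s ls, b || !pvFresh s ls) := by
  induction ls generalizing bo s b with
  | nil => simp [pvScanA, pvFresh]
  | cons x xs ih =>
    by_cases hc : x ∈ s
    · cases bo <;> by_cases ha : PySem.Chars.strIsalpha x = true <;>
        simp [List.foldl_cons, pvStepCore, pvScanA, pvFresh, hc, ha, ih]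
    · cases bo <;> by_cases ha : PySem.Chars.strIsalpha x = true <;>
        simp [List.foldl_cons, pvStepCore, pvScanA, pvFresh, hc, ha, ih]

theorem pvFoldAdd_length_le (ls : List (List Char)) (s : PySem.Set (List Char)) :
    (List.foldl PySem.Set.add s ls).length ≤ s.length + ls.length := by
  induction ls generalizing s with
  | nil => simp
  | cons x xs ih =>
    simp only [List.foldl_cons]
    refine le_trans (ih _) ?_
    by_cases hc : x ∈ s
    · simp [PySem.Set.add, hc]
    · simp [PySem.Set.add, hc]
      omega

theorem pvFresh_iff_len (ls : List (List Char)) (s : PySem.Set (List Char)) :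
    pvFresh s ls = true ↔ (List.foldl PySem.Set.add s ls).length = s.length + ls.length := by
  induction ls generalizing s with
  | nil => simp [pvFresh]
  | cons x xs ih =>
    by_cases hc : x ∈ s
    · have hadd : PySem.Set.add s x = s := by simp [PySem.Set.add, hc]
      have hle := pvFoldAdd_length_le xs s
      refine iff_of_false (by simp [pvFresh, hc]) ?_
      rw [List.foldl_cons, hadd]
      simp only [List.length_cons]
      omega
    · have hadd : (PySem.Set.add s x).length = s.length + 1 := by
        simp [PySem.Set.add, hc]
      rw [show pvFresh s (x :: xs) = pvFresh (PySem.Set.add s x) xs by simp [pvFresh, hc],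
        List.foldl_cons, ih, hadd]
      simp only [List.length_cons]
      omega

theorem pvSplitOnGo_ne_nil (sep : List Char) (fuel : Nat) (l cur : List Char)
    (acc : List (List Char)) : PySem.Chars.splitOn.go sep fuel l cur acc ≠ [] := by
  induction fuel generalizing l cur acc with
  | zero => simp [PySem.Chars.splitOn.go]
  | succ n ih =>
    cases l with
    | nil => simp [PySem.Chars.splitOn.go]
    | cons c rest =>
      rw [PySem.Chars.splitOn.go]
      split
      · exact ih _ _ _
      · exact ih _ _ _

theorem pvSplitOn_ne_nil (cs sep : List Char) : PySem.Chars.splitOn cs sep ≠ [] := by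
  unfold PySem.Chars.splitOn; exact pvSplitOnGo_ne_nil _ _ _ _ _

-- ===== VERDICT (by name: the statement is the Claim_ definition above) =====
theorem validar_letras_spec : Claim_equal_validar_letras := by
  intro entrada _
  unfold Spec_validar_letras validar_letras validar_letras_alt
  have hsplit := pvSplitOn_ne_nil entrada.toList [',']
  set toks := PySem.Chars.splitOn entrada.toList [','] with htoks
  have hfold : toks.foldl pvStepB (none, PySem.Set.empty, false) =
      ((toks.map PySem.Chars.strip).foldl pvStepCore (none, PySem.Set.empty, false)) := by
    rw [List.foldl_map]; rfl
  set letras := toks.map PySem.Chars.strip with hletras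
  have hne : letras.length ≠ 0 := by
    simp [hletras]; exact hsplit
  rw [hfold, pvFoldInv]
  simp only [Option.none_or, Bool.false_or]
  have h0 : (letras.length == 0) = false := by simp [hne]
  rw [h0, if_neg (by simp)]
  cases hscan : pvScanA letras with
  | some letra => rfl
  | none =>
    simp only
    have hofl : PySem.Set.ofList letras = List.foldl PySem.Set.add [] letras :=
      PySem.Set.ofList_eq_foldl letras
    by_cases hf : pvFresh PySem.Set.empty letras = true
    · have hlen := (pvFresh_iff_len letras PySem.Set.empty).mp hf
      have heq : (List.foldl PySem.Set.add PySem.Set.empty letras).length = letras.length := by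
        simp only [PySem.Set.empty] at hlen
        simpa using hlen
      have : (letras.length != (PySem.Set.ofList letras).length) = false := by
        rw [hofl]
        simp only [PySem.Set.empty] at heq
        rw [heq]
        simp
      rw [this, hf]
      simp
    · have hlen : (List.foldl PySem.Set.add (PySem.Set.empty : PySem.Set (List Char)) letras).length ≠
          (PySem.Set.empty : PySem.Set (List Char)).length + letras.length := by
        intro h; exact hf ((pvFresh_iff_len letras PySem.Set.empty).mpr h)
      have : (letras.length != (PySem.Set.ofList letras).length) = true := by
        rw [hofl]
        simp only [bne_iff_ne, ne_eq]
        intro h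
        refine hlen ?_
        simp only [PySem.Set.empty, List.length_nil]
        omega
      have hf' : pvFresh PySem.Set.empty letras = false := by
        simpa using hf
      rw [this]
      simp [show pvFresh [] letras = false from hf']
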